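-- pv_equiv track=rewrite | github.com/3N3G/Craftax_Baselines | online_rl_hidden.py | filter_text_obs
-- ===== SOURCE A (Python) =====
-- BACKGROUND_TILES = {"grass", "sand", "gravel", "fire grass", "ice grass", "fire_grass", "ice_grass"}
--
-- def filter_text_obs(text_obs: str) -> str:
--     """Filter out background tiles from observations."""
--     lines = text_obs.split('\n')
--     filtered_lines = []
--     in_map_section = False
--     interesting_tiles = []
--
--     for line in lines:
--         stripped = line.strip()
--
--         if stripped == 'Map:':
--             in_map_section = True
--             interesting_tiles = []
--             continue
--
--         if in_map_section:
--             if ':' in stripped and ',' in stripped.split(':')[0]: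
--                 parts = stripped.split(':', 1)
--                 if len(parts) == 2:
--                     coord = parts[0].strip()
--                     tile = parts[1].strip().lower()
--                     is_background = tile in BACKGROUND_TILES
--                     has_entity = ' on ' in tile
--                     if not is_background or has_entity:
--                         interesting_tiles.append(f"{coord}:{parts[1].strip()}")
--                 continue
--             else:
--                 in_map_section = False
--                 if interesting_tiles:
--                     filtered_lines.append(f"Map (interesting tiles only): {', '.join(interesting_tiles)}")
--                 else:
--                     filtered_lines.append("Map: [No interesting tiles]")
--                 if stripped:
--                     filtered_lines.append(line)
--                 continue
--
--         if stripped: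
--             filtered_lines.append(line)
--
--     if in_map_section:
--         if interesting_tiles:
--             filtered_lines.append(f"Map (interesting tiles only): {', '.join(interesting_tiles)}")
--         else:
--             filtered_lines.append("Map: [No interesting tiles]")
--
--     return '\n'.join(filtered_lines)
-- ===== SOURCE B (Python) =====
-- BACKGROUND_TILES = {"grass", "sand", "gravel", "fire grass", "ice grass", "fire_grass", "ice_grass"}
--
-- def filter_text_obs(text_obs: str) -> str:
--     """Filter out background tiles: outer index loop, inner loop consuming each map section."""
--     lines = text_obs.split('\n')
--     out = []
--     n = len(lines)
--     i = 0
--     while i < n: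
--         line = lines[i]
--         stripped = line.strip()
--         i += 1
--         if stripped == 'Map:':
--             tiles = []
--             while i < n:
--                 s = lines[i].strip()
--                 if s == 'Map:':
--                     tiles = []
--                 elif ':' in s and ',' in s.split(':')[0]:
--                     coord, tile = s.split(':', 1)
--                     t = tile.strip()
--                     tl = t.lower()
--                     if tl not in BACKGROUND_TILES or ' on ' in tl:
--                         tiles.append(f"{coord.strip()}:{t}")
--                 else:
--                     break
--                 i += 1
--             if tiles:
--                 out.append(f"Map (interesting tiles only): {', '.join(tiles)}")
--             else:
--                 out.append("Map: [No interesting tiles]")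
--             if i < n:
--                 if lines[i].strip():
--                     out.append(lines[i])
--                 i += 1
--         elif stripped:
--             out.append(line)
--     return '\n'.join(out)
-- ===== Notes on version B (the rewrite author's own statement) =====
-- stated objective: alternative
-- what changed: A's single fold over lines carrying in_map/tiles state flags is replaced by an outer index loop with a nested inner loop that consumes each map header section and emits its summary in place, eliminating the mode flag and trailing-flush state.
import Mathlib
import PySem

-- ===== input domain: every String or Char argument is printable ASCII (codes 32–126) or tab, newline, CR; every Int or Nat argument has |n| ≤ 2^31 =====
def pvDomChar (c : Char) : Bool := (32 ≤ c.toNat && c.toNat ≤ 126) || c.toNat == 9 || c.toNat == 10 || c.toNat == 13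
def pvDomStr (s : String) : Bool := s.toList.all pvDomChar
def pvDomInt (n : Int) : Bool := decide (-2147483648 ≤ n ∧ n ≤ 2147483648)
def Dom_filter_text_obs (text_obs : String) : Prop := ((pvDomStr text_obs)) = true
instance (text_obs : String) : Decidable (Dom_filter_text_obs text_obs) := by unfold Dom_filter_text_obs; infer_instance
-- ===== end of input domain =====

-- B replaces A's single fold with state flags by an outer line loop with an inner loop that
-- consumes each map section; same return value (alternative decomposition, no speed claim).

-- ===== PORT A =====
def pvA_bg : PySem.Set String :=
  PySem.Set.ofList ["grass", "sand", "gravel", "fire grass", "ice grass", "fire_grass", "ice_grass"]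

-- the loop body of A's 'for line in lines' (state: filtered_lines, in_map_section, interesting_tiles)
def pvA_step : List String × Bool × List String → String → List String × Bool × List String
  | (acc, inMap, tiles), line =>
  let stripped := PySem.Str.strip line
  if stripped = "Map:" then (acc, true, ([] : List String))
  else if inMap then
    if PySem.Str.isIn ":" stripped &&
       PySem.Str.isIn "," (((PySem.Str.split? stripped ":").getD []).headD "") then
      -- stripped.split(':', 1); the 'len(parts) == 2' test is the [p0, p1] pattern
      match (PySem.Str.splitMax? stripped ":" 1).getD [] with
      | [p0, p1] =>
        let coord := PySem.Str.strip p0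
        let tileRaw := PySem.Str.strip p1
        let tile := PySem.Str.lower tileRaw
        let isBackground := PySem.Set.contains pvA_bg tile
        let hasEntity := PySem.Str.isIn " on " tile
        if !isBackground || hasEntity then (acc, true, tiles ++ [coord ++ ":" ++ tileRaw])
        else (acc, true, tiles)
      | _ => (acc, true, tiles)
    else
      let acc2 := acc ++ [if tiles ≠ [] then
          "Map (interesting tiles only): " ++ PySem.Str.join ", " tiles
        else "Map: [No interesting tiles]"]
      (if stripped ≠ "" then acc2 ++ [line] else acc2, false, tiles)
  else
    (if stripped ≠ "" then acc ++ [line] else acc, false, tiles)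

def filter_text_obs (text_obs : String) : String :=
  let lines := (PySem.Str.split? text_obs "\n").getD []
  let st := lines.foldl pvA_step (([] : List String), false, ([] : List String))
  let acc := if st.2.1 then
      st.1 ++ [if st.2.2 ≠ [] then
          "Map (interesting tiles only): " ++ PySem.Str.join ", " st.2.2
        else "Map: [No interesting tiles]"]
    else st.1
  PySem.Str.join "\n" acc

-- ===== PORT B =====
def pvB_bg : PySem.Set String :=
  PySem.Set.ofList ["grass", "sand", "gravel", "fire grass", "ice grass", "fire_grass", "ice_grass"]

def pvB_flush (tiles : List String) : String :=
  if tiles ≠ [] then "Map (interesting tiles only): " ++ PySem.Str.join ", " tiles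
  else "Map: [No interesting tiles]"

-- the two while-loops of Source B, as mutual recursion over the remaining lines
mutual
  def pvB_outer (acc : List String) (rest : List String) : List String :=
    match rest with
    | [] => acc
    | line :: rest' =>
      let stripped := PySem.Str.strip line
      if stripped = "Map:" then pvB_inner acc [] rest'
      else if stripped ≠ "" then pvB_outer (acc ++ [line]) rest'
      else pvB_outer acc rest'

  def pvB_inner (acc : List String) (tiles : List String) (rest : List String) : List String :=
    match rest with
    | [] => acc ++ [pvB_flush tiles]
    | line :: rest' =>
      let s := PySem.Str.strip line
      if s = "Map:" then pvB_inner acc [] rest'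
      else if PySem.Str.isIn ":" s &&
              PySem.Str.isIn "," (((PySem.Str.split? s ":").getD []).headD "") then
        -- 'coord, tile = s.split(':', 1)' (always two parts here)
        match (PySem.Str.splitMax? s ":" 1).getD [] with
        | [coord, tile] =>
          let t := PySem.Str.strip tile
          let tl := PySem.Str.lower t
          if !(PySem.Set.contains pvB_bg tl) || PySem.Str.isIn " on " tl then
            pvB_inner acc (tiles ++ [PySem.Str.strip coord ++ ":" ++ t]) rest'
          else pvB_inner acc tiles rest'
        | _ => pvB_inner acc tiles rest'
      else
        -- break: flush, re-emit the terminating line if non-empty, continue in the outer loop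
        let acc2 := acc ++ [pvB_flush tiles]
        pvB_outer (if s ≠ "" then acc2 ++ [line] else acc2) rest'
end

def filter_text_obs_alt (text_obs : String) : String :=
  PySem.Str.join "\n" (pvB_outer [] ((PySem.Str.split? text_obs "\n").getD []))

-- ===== PRECONDITION & SPEC =====
def Spec_filter_text_obs (text_obs : String) (out : String) : Prop := out = filter_text_obs_alt text_obs
instance (text_obs : String) (out : String) : Decidable (Spec_filter_text_obs text_obs out) := by unfold Spec_filter_text_obs; infer_instance

-- ===== CLAIM (what is proved, stated in full; the proofs are below) =====
def Claim_equal_filter_text_obs : Prop := ∀ (text_obs : String), Dom_filter_text_obs text_obs → Spec_filter_text_obs text_obs (filter_text_obs text_obs)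

-- ===== LEMMAS AND PROOFS =====

-- A's result after the trailing flush, from an arbitrary loop state
def pvFinish (st : List String × Bool × List String) : List String :=
  if st.2.1 then st.1 ++ [pvB_flush st.2.2] else st.1

theorem pv_key (lines : List String) :
    (∀ acc tiles, pvFinish (lines.foldl pvA_step (acc, false, tiles)) = pvB_outer acc lines)
    ∧ (∀ acc tiles, pvFinish (lines.foldl pvA_step (acc, true, tiles)) = pvB_inner acc tiles lines) := by
  induction lines with
  | nil => exact ⟨fun acc tiles => rfl, fun acc tiles => rfl⟩
  | cons line rest ih =>
    refine ⟨fun acc tiles => ?_, fun acc tiles => ?_⟩ <;>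
    · rcases hp : (PySem.Str.splitMax? (PySem.Str.strip line) ":" 1).getD []
        with _ | ⟨p0, _ | ⟨p1, _ | _⟩⟩ <;>
      simp only [List.foldl, pvA_step, pvB_outer, pvB_inner, pvB_flush, pvA_bg, pvB_bg, hp,
        reduceIte] <;>
      split_ifs <;>
      first
        | exact ih.1 _ _
        | exact ih.2 _ _
        | rfl
        | exact (False.elim (by assumption))

-- ===== VERDICT (by name: the statement is the Claim_ definition above) =====
theorem filter_text_obs_spec : Claim_equal_filter_text_obs := by
  intro text_obs _
  unfold Spec_filter_text_obs filter_text_obs filter_text_obs_alt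
  exact congrArg (PySem.Str.join "\n") ((pv_key ((PySem.Str.split? text_obs "\n").getD [])).1 [] [])
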